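-- pv_equiv track=rewrite | github.com/Xiaodao-chen/PHC | scripts/vis/vis_motion_g1_29dof_mj.py | pick_key
-- ===== SOURCE A (Python) =====
-- def pick_key(keys, start_key: str = "", start_idx: int = 0):
--     """按优先级选择初始 clip：精确匹配start_key->包含start_key->start_idx。"""
--     if start_key and start_key in keys:
--         return keys.index(start_key)
--     if start_key:
--         for i, k in enumerate(keys):
--             if start_key in k:
--                 return i
--     start_idx = max(0, min(len(keys)-1, int(start_idx)))
--     return start_idx
-- ===== SOURCE B (Python) =====
-- def pick_key(keys, start_key: str = "", start_idx: int = 0):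
--     """Argmin formulation: rank every key (0 exact, 1 substring, 2 miss) and
--     take the lexicographically smallest (rank, index) pair."""
--     if start_key:
--         rank, i = min(((0 if k == start_key else 1 if start_key in k else 2, i)
--                        for i, k in enumerate(keys)), default=(2, 0))
--         if rank < 2:
--             return i
--     return max(0, min(len(keys) - 1, int(start_idx)))
-- ===== Notes on version B (the rewrite author's own statement) =====
-- stated objective: alternative
-- what changed: Replaces A's staged scans (exact membership+index, then a substring enumerate loop) with an argmin: every key is ranked 0/exact, 1/substring, 2/miss and the lexicographic minimum (rank, index) pair decides the result.
import Mathlib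
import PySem

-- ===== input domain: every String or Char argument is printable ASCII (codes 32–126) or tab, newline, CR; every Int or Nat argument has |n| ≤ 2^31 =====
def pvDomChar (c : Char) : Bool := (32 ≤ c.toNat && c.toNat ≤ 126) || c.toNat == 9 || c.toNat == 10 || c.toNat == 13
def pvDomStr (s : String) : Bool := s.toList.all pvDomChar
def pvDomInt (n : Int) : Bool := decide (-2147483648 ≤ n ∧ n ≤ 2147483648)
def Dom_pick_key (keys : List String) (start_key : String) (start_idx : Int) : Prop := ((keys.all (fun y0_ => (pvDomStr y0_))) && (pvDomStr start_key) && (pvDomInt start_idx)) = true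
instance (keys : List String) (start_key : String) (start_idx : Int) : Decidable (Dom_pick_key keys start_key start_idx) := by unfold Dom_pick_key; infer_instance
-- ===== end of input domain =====

-- B replaces A's staged scans (exact membership+index, then a substring enumerate loop)
-- by an argmin: each key is ranked 0/exact, 1/substring, 2/miss and the lexicographic
-- minimum (rank, index) pair decides the result; alternative decomposition, same cost.


-- ===== PORT A =====
-- A's substring loop: `for i, k in enumerate(keys): if start_key in k: return i`
def pickLoopA (sk : String) : List String → Int → Option Int
  | [], _ => none
  | k :: rest, i => if PySem.Str.isIn sk k then some i else pickLoopA sk rest (i + 1)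

def pick_key (keys : List String) (start_key : String) (start_idx : Int) : Int :=
  if start_key != "" && keys.contains start_key then
    match PySem.List.index? keys start_key with
    | some j => (j : Int)
    | none => 0   -- unreachable: guarded by the membership test
  else if start_key != "" then
    match pickLoopA start_key keys 0 with
    | some i => i
    | none => max 0 (min ((keys.length : Int) - 1) start_idx)
  else max 0 (min ((keys.length : Int) - 1) start_idx)

-- ===== PORT B =====
-- rank of one key: 0 exact, 1 substring, 2 miss
def rankB (sk k : String) : Int :=
  if k == sk then 0 else if PySem.Str.isIn sk k then 1 else 2

def pick_key_alt (keys : List String) (start_key : String) (start_idx : Int) : Int :=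
  if start_key != "" then
    -- min(((rank, i) for i, k in enumerate(keys)), default=(2, 0)) as min2? over the pairs
    let pairs := (PySem.List.enumerate keys 0).map (fun p => (rankB start_key p.2, p.1))
    match PySem.List.min2? pairs (fun q => q.1) (fun q => q.2) with
    | some q => if q.1 < 2 then q.2 else max 0 (min ((keys.length : Int) - 1) start_idx)
    | none => max 0 (min ((keys.length : Int) - 1) start_idx)
  else max 0 (min ((keys.length : Int) - 1) start_idx)

-- ===== PRECONDITION & SPEC =====
def Spec_pick_key (keys : List String) (start_key : String) (start_idx : Int) (out : Int) : Prop := out = pick_key_alt keys start_key start_idx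
instance (keys : List String) (start_key : String) (start_idx : Int) (out : Int) : Decidable (Spec_pick_key keys start_key start_idx out) := by unfold Spec_pick_key; infer_instance

-- ===== CLAIM (what is proved, stated in full; the proofs are below) =====
def Claim_equal_pick_key : Prop := ∀ (keys : List String) (start_key : String) (start_idx : Int), Dom_pick_key keys start_key start_idx → Spec_pick_key keys start_key start_idx (pick_key keys start_key start_idx)

-- ===== LEMMAS AND PROOFS =====

-- first exact-match index starting at i
def exactFind (sk : String) : List String → Int → Option Int
  | [], _ => none
  | k :: rest, i => if k == sk then some i else exactFind sk rest (i + 1)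

-- right-recursive "best (rank, index)" of the scored list; head wins ties
def bestB (sk : String) : List String → Int → Option (Int × Int)
  | [], _ => none
  | k :: rest, i =>
    match bestB sk rest (i + 1) with
    | none => some (rankB sk k, i)
    | some m => if rankB sk k ≤ m.1 then some (rankB sk k, i) else some m

-- the foldl step of min2? with k1 = fst, k2 = snd
def mstep (acc : Option (Int × Int)) (x : Int × Int) : Option (Int × Int) :=
  match acc with
  | none => some x
  | some m => if (decide (x.1 < m.1) || !decide (m.1 < x.1) && decide (x.2 < m.2)) = true then some x else some m

theorem min2?_eq_foldl (xs : List (Int × Int)) :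
    PySem.List.min2? xs (fun q => q.1) (fun q => q.2) = xs.foldl mstep none := by
  unfold PySem.List.min2?
  congr 1
  funext acc x
  cases acc <;> rfl

theorem foldl_mstep_some (sk : String) : ∀ (keys : List String) (i : Int) (m : Int × Int), m.2 < i →
    ((PySem.List.enumerate keys i).map (fun p => (rankB sk p.2, p.1))).foldl mstep (some m) =
      some (match bestB sk keys i with
            | none => m
            | some b => if b.1 < m.1 then b else m) := by
  intro keys
  induction keys with
  | nil => intro i m _; simp [PySem.List.enumerate_nil, bestB]
  | cons k rest ih =>
    intro i m hm
    rw [PySem.List.enumerate_cons]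
    simp only [List.map_cons, List.foldl_cons]
    have hx2 : ¬ ((i : Int) < m.2) := by omega
    rw [show mstep (some m) (rankB sk k, i) =
        some (if rankB sk k < m.1 then (rankB sk k, i) else m) by
      simp only [mstep]
      split_ifs with h1 h2 h3 <;> simp_all <;> try omega]
    by_cases h : rankB sk k < m.1
    · rw [if_pos h, ih (i+1) (rankB sk k, i) (by simp)]
      rw [bestB]
      cases hb : bestB sk rest (i+1) with
      | none => simp [h]
      | some b =>
        simp only
        split_ifs <;> simp_all <;> try omega
    · rw [if_neg h, ih (i+1) m (by omega)]
      rw [bestB]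
      cases hb : bestB sk rest (i+1) with
      | none => simp; omega
      | some b =>
        simp only
        split_ifs <;> simp_all <;> try omega

theorem foldl_mstep_none (sk : String) (keys : List String) (i : Int) :
    ((PySem.List.enumerate keys i).map (fun p => (rankB sk p.2, p.1))).foldl mstep none =
      bestB sk keys i := by
  cases keys with
  | nil => simp [PySem.List.enumerate_nil, bestB]
  | cons k rest =>
    rw [PySem.List.enumerate_cons]
    simp only [List.map_cons, List.foldl_cons]
    rw [show mstep none (rankB sk k, i) = some (rankB sk k, i) from rfl]
    rw [foldl_mstep_some sk rest (i+1) (rankB sk k, i) (by simp)]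
    rw [bestB]
    cases hb : bestB sk rest (i+1) with
    | none => simp
    | some b =>
      simp only
      split_ifs <;> simp_all <;> try omega

theorem bestB_none_iff (sk : String) (keys : List String) (i : Int) :
    bestB sk keys i = none ↔ keys = [] := by
  cases keys with
  | nil => simp [bestB]
  | cons k rest =>
    rw [bestB]
    cases bestB sk rest (i+1) <;> simp <;> split_ifs <;> simp

-- characterisation of bestB against A's two scans
theorem bestB_char (sk : String) : ∀ (keys : List String) (i : Int) (b : Int × Int),
    bestB sk keys i = some b →
      (b.1 = 0 ∧ exactFind sk keys i = some b.2) ∨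
      (b.1 = 1 ∧ exactFind sk keys i = none ∧ pickLoopA sk keys i = some b.2) ∨
      (b.1 = 2 ∧ exactFind sk keys i = none ∧ pickLoopA sk keys i = none) := by
  intro keys
  induction keys with
  | nil => intro i b h; simp [bestB] at h
  | cons k rest ih =>
    intro i b h
    rw [bestB] at h
    rw [exactFind, pickLoopA]
    by_cases hk : (k == sk) = true
    · have hr : rankB sk k = 0 := by simp [rankB, hk]
      cases hb : bestB sk rest (i+1) with
      | none =>
        simp only [hb, hr] at h
        replace h : ((0 : Int), i) = b := by simpa using h
        subst h; left; simp [hk]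
      | some m =>
        simp only [hb, hr] at h
        have hm1 : m.1 = 0 ∨ m.1 = 1 ∨ m.1 = 2 := by
          rcases ih (i+1) m hb with ⟨h1,_⟩|⟨h1,_⟩|⟨h1,_⟩ <;> omega
        have h' : b = (0, i) := by
          rcases hm1 with h1|h1|h1 <;> rw [h1] at h <;> simp at h <;> exact h.symm
        left; simp [hk, h']
    · have hks : k ≠ sk := by simpa using hk
      by_cases hs : PySem.Str.isIn sk k = true
      · have hs2 : PySem.Chars.isIn sk.toList k.toList = true := hs
        have hr : rankB sk k = 1 := by simp [rankB, hk, hs2]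
        cases hb : bestB sk rest (i+1) with
        | none =>
          have hnil : rest = [] := (bestB_none_iff sk rest (i+1)).mp hb
          subst hnil
          simp only [hb, hr] at h
          replace h : ((1 : Int), i) = b := by simpa using h
          subst h
          right; left
          simp [hk, hs2, exactFind]
        | some m =>
          simp only [hb, hr] at h
          rcases ih (i+1) m hb with ⟨h1,h2⟩ | ⟨h1,h2,h3⟩ | ⟨h1,h2,h3⟩
          · rw [h1] at h; simp at h
            left; rw [← h]; simp [hk, h1, h2]
          · rw [h1] at h; simp at h
            right; left; rw [← h]; simp [hk, hs2, h2]
          · rw [h1] at h; simp at h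
            right; left; rw [← h]; simp [hk, hs2, h2]
      · have hs2 : PySem.Chars.isIn sk.toList k.toList = false := by simpa using hs
        have hr : rankB sk k = 2 := by simp [rankB, hk, hs2]
        cases hb : bestB sk rest (i+1) with
        | none =>
          have hnil : rest = [] := (bestB_none_iff sk rest (i+1)).mp hb
          subst hnil
          simp only [hb, hr] at h
          replace h : ((2 : Int), i) = b := by simpa using h
          subst h
          right; right
          simp [hk, hs2, exactFind, pickLoopA]
        | some m =>
          simp only [hb, hr] at h
          rcases ih (i+1) m hb with ⟨h1,h2⟩ | ⟨h1,h2,h3⟩ | ⟨h1,h2,h3⟩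
          · rw [h1] at h; simp at h
            left; rw [← h]; simp [hk, h1, h2]
          · rw [h1] at h; simp at h
            right; left; rw [← h]; simp [hk, hs2, h1, h2, h3]
          · rw [h1] at h; simp at h
            right; right; rw [← h]; simp [hk, hs2, h1, h2, h3]

theorem exactFind_eq_index? (sk : String) : ∀ (keys : List String) (i : Int),
    exactFind sk keys i = (PySem.List.index? keys sk).map (fun j => i + j) := by
  intro keys
  induction keys with
  | nil =>
    intro i
    have h : PySem.List.index? ([] : List String) sk = none := by
      rw [PySem.List.index?_eq_none_iff]; simp
    rw [exactFind, h]; rfl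
  | cons k rest ih =>
    intro i
    by_cases hx : (k == sk) = true
    · have hk : k = sk := by simpa using hx
      subst hk
      rw [exactFind, PySem.List.index?_cons_self]
      simp
    · have hk : k ≠ sk := by simpa using hx
      rw [exactFind, PySem.List.index?_cons_of_ne rest hk, ih]
      simp only [hx, Bool.false_eq_true, if_false]
      cases PySem.List.index? rest sk with
      | none => rfl
      | some j => simp; omega

-- ===== VERDICT (by name: the statement is the Claim_ definition above) =====
theorem pick_key_spec : Claim_equal_pick_key := by
  intro keys start_key start_idx _
  unfold Spec_pick_key pick_key pick_key_alt
  by_cases hk : start_key = ""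
  · simp [hk]
  · have hne : (start_key != "") = true := by simpa using hk
    simp only [hne, Bool.true_and, if_true]
    rw [min2?_eq_foldl, foldl_mstep_none]
    cases hb : bestB start_key keys 0 with
    | none =>
      have hnil : keys = [] := (bestB_none_iff start_key keys 0).mp hb
      subst hnil
      simp [pickLoopA]
    | some b =>
      rcases bestB_char start_key keys 0 b hb with ⟨h1,h2⟩ | ⟨h1,h2,h3⟩ | ⟨h1,h2,h3⟩
      · rw [exactFind_eq_index?] at h2
        cases hj : PySem.List.index? keys start_key with
        | none => rw [hj] at h2; simp at h2
        | some j =>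
          have hmem : start_key ∈ keys := by
            have := (PySem.List.index?_isSome_iff keys start_key).mp (by rw [hj]; rfl)
            exact this
          have hcon : keys.contains start_key = true := by simpa using hmem
          rw [hj] at h2; simp at h2
          simp [h1, ← h2, hmem]
      · rw [exactFind_eq_index?] at h2
        have hnone : PySem.List.index? keys start_key = none := by
          cases hj : PySem.List.index? keys start_key with
          | none => rfl
          | some j => rw [hj] at h2; simp at h2
        have hnm : start_key ∉ keys := by
          rw [PySem.List.index?_eq_none_iff] at hnone; simpa using hnone
        have hcon : keys.contains start_key = false := by simpa using hnm
        simp [hnm, h3, h1]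
      · rw [exactFind_eq_index?] at h2
        have hnone : PySem.List.index? keys start_key = none := by
          cases hj : PySem.List.index? keys start_key with
          | none => rfl
          | some j => rw [hj] at h2; simp at h2
        have hnm : start_key ∉ keys := by
          rw [PySem.List.index?_eq_none_iff] at hnone; simpa using hnone
        have hcon : keys.contains start_key = false := by simpa using hnm
        simp [hnm, h3, h1]
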